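-- pv_equiv track=rewrite | github.com/Rogoyin/Modulio | Dicpy.py | Obtener_Clave_Por_Indice
-- ===== SOURCE A (Python) =====
-- from typing import Any, Dict, List, Set
--
-- def Obtener_Clave_Por_Indice(
--     Diccionario: Dict[str, Any],
--     Indice: int
-- ) -> str:
--
--     """
--     Recupera una clave de un diccionario por su índice.
--
--     Parámetros:
--         Diccionario (Dict[str, Any]): El diccionario del cual recuperar
--         la clave.
--         Indice (int): El índice de la clave a recuperar.
--
--     Retorna:
--         str: La clave en el índice especificado.
--
--     Lanza:
--         KeyError: Si el índice está fuera de rango.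
--
--     Ejemplo:
--         >>> Obtener_Clave_Por_Indice({'a': 1, 'b': 2, 'c': 3}, 1)
--         'b'
--
--     """
--
--     Contador = 0
--
--     if Indice >= len(Diccionario):
--         # Lanzar KeyError si el índice excede la longitud del
--         # diccionario.
--         raise KeyError("El diccionario no tiene tantos índices.")
--
--     for Clave in Diccionario.keys():
--         if Contador == Indice:
--             return str(Clave)
--         Contador += 1
--
--     # Esta línea asegura un retorno de string en caso de problemas
--     # inesperados.
--     raise KeyError("Índice no encontrado en el diccionario.")
-- ===== SOURCE B (Python) =====
-- def Obtener_Clave_Por_Indice(Diccionario, Indice):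
--     if not 0 <= Indice < len(Diccionario):
--         raise KeyError("El diccionario no tiene tantos índices.")
--     return str(list(Diccionario)[Indice])
-- ===== Notes on version B (the rewrite author's own statement) =====
-- stated objective: simpler
-- what changed: Replaces the counter-walk over dict keys (with two separate raise sites) by one explicit range guard followed by direct positional indexing into the materialized key list.
import Mathlib
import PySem

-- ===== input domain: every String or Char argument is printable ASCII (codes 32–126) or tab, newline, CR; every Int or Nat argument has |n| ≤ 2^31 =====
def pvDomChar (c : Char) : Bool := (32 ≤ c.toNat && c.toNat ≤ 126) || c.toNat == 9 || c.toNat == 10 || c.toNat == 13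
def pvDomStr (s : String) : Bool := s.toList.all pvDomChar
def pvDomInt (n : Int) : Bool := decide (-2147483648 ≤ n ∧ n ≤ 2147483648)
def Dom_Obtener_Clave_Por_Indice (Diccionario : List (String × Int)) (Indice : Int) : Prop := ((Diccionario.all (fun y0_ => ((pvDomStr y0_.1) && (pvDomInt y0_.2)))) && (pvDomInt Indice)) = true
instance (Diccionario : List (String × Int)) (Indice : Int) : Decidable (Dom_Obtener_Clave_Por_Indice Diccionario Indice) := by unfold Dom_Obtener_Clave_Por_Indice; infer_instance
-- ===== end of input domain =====

-- B replaces A's counter-walk over the keys by a single explicit range guard plus direct positional indexing (objective: simpler).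

-- ===== PORT A =====
-- A's for-loop over Diccionario.keys() with the counter Contador; [] falls through to the final raise (excluded by Pre_).
def pvLoopA : List String → Int → Int → String
  | [], _, _ => ""            -- final 'raise KeyError' site; unreachable under Pre_
  | k :: rest, c, i => if c = i then k else pvLoopA rest (c + 1) i

def Obtener_Clave_Por_Indice (Diccionario : List (String × Int)) (Indice : Int) : String :=
  if Indice ≥ (Diccionario.length : Int) then ""   -- first 'raise KeyError'; unreachable under Pre_
  else pvLoopA (Diccionario.map Prod.fst) 0 Indice

-- ===== PORT B =====
def Obtener_Clave_Por_Indice_alt (Diccionario : List (String × Int)) (Indice : Int) : String :=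
  if 0 ≤ Indice ∧ Indice < (Diccionario.length : Int) then
    (PySem.List.pyGet? (Diccionario.map Prod.fst) Indice).getD ""   -- list(Diccionario)[Indice]; getD arm unreachable (index in range)
  else ""                                                           -- 'raise KeyError'; unreachable under Pre_

-- ===== PRECONDITION & SPEC =====
-- A raises KeyError whenever Indice ≥ len (explicit check) or Indice < 0 (the counter never matches); Pre_ excludes exactly those.
def Pre_Obtener_Clave_Por_Indice (Diccionario : List (String × Int)) (Indice : Int) : Prop :=
  0 ≤ Indice ∧ Indice < (Diccionario.length : Int)
instance (Diccionario : List (String × Int)) (Indice : Int) : Decidable (Pre_Obtener_Clave_Por_Indice Diccionario Indice) := by unfold Pre_Obtener_Clave_Por_Indice; infer_instance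
def pvWitness_Obtener_Clave_Por_Indice : (List (String × Int)) × Int := ([("a", 1), ("b", 2)], 1)

def Spec_Obtener_Clave_Por_Indice (Diccionario : List (String × Int)) (Indice : Int) (out : String) : Prop := out = Obtener_Clave_Por_Indice_alt Diccionario Indice
instance (Diccionario : List (String × Int)) (Indice : Int) (out : String) : Decidable (Spec_Obtener_Clave_Por_Indice Diccionario Indice out) := by unfold Spec_Obtener_Clave_Por_Indice; infer_instance

-- ===== CLAIM (what is proved, stated in full; the proofs are below) =====
def Claim_equal_Obtener_Clave_Por_Indice : Prop := ∀ (Diccionario : List (String × Int)) (Indice : Int), Dom_Obtener_Clave_Por_Indice Diccionario Indice → Pre_Obtener_Clave_Por_Indice Diccionario Indice → Spec_Obtener_Clave_Por_Indice Diccionario Indice (Obtener_Clave_Por_Indice Diccionario Indice)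

-- ===== LEMMAS AND PROOFS =====
lemma pvLoopA_eq (keys : List String) : ∀ (c i : Int), c ≤ i → i - c < (keys.length : Int) →
    pvLoopA keys c i = keys.getD (i - c).toNat "" := by
  induction keys with
  | nil => intro c i hci h; simp at h; omega
  | cons k rest ih =>
    intro c i hci h
    by_cases hc : c = i
    · subst hc; simp [pvLoopA]
    · have h1 : c + 1 ≤ i := by omega
      have h2 : i - (c + 1) < (rest.length : Int) := by simp at h ⊢; omega
      have := ih (c + 1) i h1 h2
      have ht : (i - c).toNat = (i - (c + 1)).toNat + 1 := by omega
      simp [pvLoopA, hc, this, ht]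

-- ===== VERDICT (by name: the statement is the Claim_ definition above) =====
theorem Obtener_Clave_Por_Indice_spec : Claim_equal_Obtener_Clave_Por_Indice := by
  intro D i _ hpre
  obtain ⟨h0, hlt⟩ := hpre
  unfold Spec_Obtener_Clave_Por_Indice Obtener_Clave_Por_Indice Obtener_Clave_Por_Indice_alt
  rw [if_neg (by omega), if_pos ⟨h0, hlt⟩]
  have hlen : i - 0 < ((D.map Prod.fst).length : Int) := by simpa using hlt
  rw [pvLoopA_eq _ 0 i h0 hlen]
  rw [PySem.List.pyGet?_eq_some_getElem (xs := D.map Prod.fst) h0 (by simpa using hlt)]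
  have hidx : i.toNat < D.length := by omega
  simp [List.getD_eq_getElem?_getD, List.getElem?_eq_getElem hidx]
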